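-- pv_equiv track=rewrite | github.com/vovademar/plsBlockchain | blockchain/helpers/shuffleshifter.py | shuffle_shifter
-- ===== SOURCE A (Python) =====
-- def shuffle(n, k, size):
--     # n is the number to be shifted
--     # k is the amount of shift
--     # get the actual number of bits for n
--     mask = (1 << size) - 1 # a mask with all 1 bits up to size
--     k = k % size # wrap around k if it exceeds size
--     left = (n << k) & mask # shift n left by k bits and apply the mask
--     right = n >> (size - k) # shift n right by size - k bits
--     return left | right # combine the left and right parts with bitwise or
--
-- def shift(shuffled_value, v, n):
--     shifted_value = (shuffled_value + v) % n
--     return shifted_value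
--
-- def shuffle_shifter(user_id, block_number, rounds):
--     size = 8
--     n = 2 ** size
--     v = block_number
--     F = 0x5EED
--     for _ in range(rounds):
--         shuffled = shuffle(user_id, 1, size)
--         user_id = shift(shuffled, v, n)
--         v = (F * v + 1) % n
--     return user_id
-- ===== SOURCE B (Python) =====
-- def shuffle_shifter(user_id, block_number, rounds):
--     # B: same transformation, but detect the orbit cycle of the (user_id, v)
--     # state (the step map is a permutation of Z_256 x Z_256) and fast-forward
--     # with rounds % period instead of simulating every round.
--     def step(u, v):
--         return ((((u << 1) & 255) | (u >> 7)) + v) % 256, (0x5EED * v + 1) % 256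
--
--     if rounds <= 0:
--         return user_id
--     s0 = step(user_id, block_number)
--     rem = rounds - 1
--     if rem == 0:
--         return s0[0]
--     traj = [s0]
--     state = step(*s0)
--     i = 1
--     while i < rem and state != s0:
--         traj.append(state)
--         state = step(*state)
--         i += 1
--     if i < rem:
--         # state == s0: the orbit is periodic with period i
--         return traj[rem % i][0]
--     return state[0]
-- ===== Notes on version B (the rewrite author's own statement) =====
-- stated objective: faster
-- what changed: B replaces A's round-by-round simulation with cycle detection on the (user_id, v) state (a permutation of Z_256 x Z_256 after the first round) and fast-forwards using rounds modulo the orbit period.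
import Mathlib
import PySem

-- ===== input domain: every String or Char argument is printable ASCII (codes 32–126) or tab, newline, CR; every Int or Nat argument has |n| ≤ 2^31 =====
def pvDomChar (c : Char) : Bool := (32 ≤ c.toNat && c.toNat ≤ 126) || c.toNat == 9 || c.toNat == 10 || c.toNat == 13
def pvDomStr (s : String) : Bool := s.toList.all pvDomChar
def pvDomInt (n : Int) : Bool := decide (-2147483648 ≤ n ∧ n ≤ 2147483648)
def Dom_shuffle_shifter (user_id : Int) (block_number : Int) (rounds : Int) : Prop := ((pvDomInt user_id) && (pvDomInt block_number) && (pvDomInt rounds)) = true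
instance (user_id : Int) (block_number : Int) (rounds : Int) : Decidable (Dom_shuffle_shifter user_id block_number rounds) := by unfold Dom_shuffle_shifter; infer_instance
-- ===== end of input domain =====

-- B replaces A's round-by-round simulation with cycle detection over the (user_id, v)
-- state and fast-forwards using rounds modulo the orbit period (objective: faster).


-- ===== PORT A =====
-- Python '<<'/'>>' on ints are Lean's '<<<'/'>>>' on Int (shift count a Nat);
-- '&'/'|' are PySem.Int.band/bor (Python-exact on negatives). All shift counts
-- here are nonnegative (size = 8, k = k % 8 ∈ [0,8)), so '.toNat' is exact.
def pyShuffle (n : Int) (k : Int) (size : Int) : Int :=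
  let mask : Int := ((1 : Int) <<< size.toNat) - 1
  let k : Int := PySem.Int.mod k size
  let left : Int := PySem.Int.band (n <<< k.toNat) mask
  let right : Int := n >>> (size - k).toNat
  PySem.Int.bor left right

def pyShift (shuffled_value : Int) (v : Int) (n : Int) : Int :=
  PySem.Int.mod (shuffled_value + v) n

def shuffle_shifter (user_id : Int) (block_number : Int) (rounds : Int) : Int :=
  let size : Int := 8
  let n : Int := (2 : Int) ^ (8 : Nat)  -- 2 ** size, size = 8 ≥ 0 so exact
  let F : Int := 0x5EED
  ((PySem.List.pyRange 0 rounds 1).foldl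
    (fun (s : Int × Int) _ =>
      (pyShift (pyShuffle s.1 1 size) s.2 n, PySem.Int.mod (F * s.2 + 1) n))
    (user_id, block_number)).1

-- ===== PORT B =====
def stepB (s : Int × Int) : Int × Int :=
  (PySem.Int.mod (PySem.Int.bor (PySem.Int.band (s.1 <<< (1 : Nat)) 255) (s.1 >>> (7 : Nat)) + s.2) 256,
   PySem.Int.mod (0x5EED * s.2 + 1) 256)

-- the 'while i < rem and state != s0' loop of Source B (traj, state, i are its state)
def bLoop (rem : Nat) (s0 : Int × Int) (traj : List (Int × Int)) (state : Int × Int) (i : Nat) : Int :=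
  if i < rem then
    if state = s0 then (traj.getD (rem % i) (0, 0)).1
    else bLoop rem s0 (traj ++ [state]) (stepB state) (i + 1)
  else state.1
termination_by rem - i

def shuffle_shifter_alt (user_id : Int) (block_number : Int) (rounds : Int) : Int :=
  if rounds ≤ 0 then user_id
  else
    let s0 := stepB (user_id, block_number)
    let rem := (rounds - 1).toNat
    if rem = 0 then s0.1
    else bLoop rem s0 [s0] (stepB s0) 1

-- ===== PRECONDITION & SPEC =====
def Spec_shuffle_shifter (user_id : Int) (block_number : Int) (rounds : Int) (out : Int) : Prop := out = shuffle_shifter_alt user_id block_number rounds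
instance (user_id : Int) (block_number : Int) (rounds : Int) (out : Int) : Decidable (Spec_shuffle_shifter user_id block_number rounds out) := by unfold Spec_shuffle_shifter; infer_instance

-- ===== CLAIM (what is proved, stated in full; the proofs are below) =====
def Claim_equal_shuffle_shifter : Prop := ∀ (user_id : Int) (block_number : Int) (rounds : Int), Dom_shuffle_shifter user_id block_number rounds → Spec_shuffle_shifter user_id block_number rounds (shuffle_shifter user_id block_number rounds)

-- ===== LEMMAS AND PROOFS =====

-- folding a constant-element function is function iteration
theorem foldl_const_iterate {α : Type} (f : α → α) (l : List Int) (s : α) :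
    l.foldl (fun a _ => f a) s = f^[l.length] s := by
  induction l generalizing s with
  | nil => rfl
  | cons x xs ih => simp [List.foldl, ih, Function.iterate_succ_apply]

-- one A-round equals stepB
theorem stepA_eq (s : Int × Int) :
    (pyShift (pyShuffle s.1 1 8) s.2 ((2 : Int) ^ (8 : Nat)),
      PySem.Int.mod ((0x5EED : Int) * s.2 + 1) ((2 : Int) ^ (8 : Nat))) = stepB s := by
  have h2 : ((1 : Int) <<< (8 : Nat)) - 1 = 255 := by decide
  simp [pyShuffle, pyShift, stepB, h2]

theorem A_eq_iterate (user_id block_number rounds : Int) :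
    shuffle_shifter user_id block_number rounds =
      (stepB^[rounds.toNat] (user_id, block_number)).1 := by
  unfold shuffle_shifter
  have : (fun (s : Int × Int) (_ : Int) =>
      (pyShift (pyShuffle s.1 1 8) s.2 ((2 : Int) ^ (8 : Nat)),
        PySem.Int.mod ((0x5EED : Int) * s.2 + 1) ((2 : Int) ^ (8 : Nat)))) =
      (fun (s : Int × Int) (_ : Int) => stepB s) := by
    funext s _; exact stepA_eq s
  simp only [this, foldl_const_iterate stepB, PySem.List.length_pyRange_one]
  norm_num

-- periodicity: a fixed point of f^[p] lets any iterate be reduced mod p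
theorem iterate_mod {α : Type} (f : α → α) (x : α) (p : Nat) (hp : 0 < p)
    (h : f^[p] x = x) : ∀ n, f^[n] x = f^[n % p] x := by
  intro n
  induction n using Nat.strong_induction_on with
  | _ n ih =>
    by_cases hn : n < p
    · rw [Nat.mod_eq_of_lt hn]
    · have hs : f^[n] x = f^[n - p] x := by
        conv_lhs => rw [show n = p + (n - p) by omega]
        rw [Nat.add_comm, Function.iterate_add_apply, h]
      rw [hs, ih _ (by omega)]
      conv_rhs => rw [Nat.mod_eq_sub_mod (show p ≤ n by omega)]

theorem bLoop_eq (rem : Nat) (s0 : Int × Int) :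
    ∀ (k i : Nat) (traj : List (Int × Int)) (state : Int × Int),
      rem - i = k → 0 < i → i ≤ rem → traj.length = i →
      (∀ j, j < i → traj.getD j (0, 0) = stepB^[j] s0) →
      state = stepB^[i] s0 →
      bLoop rem s0 traj state i = (stepB^[rem] s0).1 := by
  intro k
  induction k with
  | zero =>
    intro i traj state hk h0 hle hlen htraj hstate
    have hi : i = rem := by omega
    rw [bLoop]
    simp [hstate, hi]
  | succ k ih =>
    intro i traj state hk h0 hle hlen htraj hstate
    have hlt : i < rem := by omega
    rw [bLoop]
    simp only [hlt, if_true]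
    by_cases hs : state = s0
    · simp only [hs, if_true]
      have hfix : stepB^[i] s0 = s0 := by rw [← hstate, hs]
      rw [iterate_mod stepB s0 i h0 hfix rem]
      rw [htraj (rem % i) (Nat.mod_lt _ h0)]
    · simp only [hs, if_false]
      apply ih (i + 1) (traj ++ [state]) (stepB state) (by omega) (by omega) (by omega)
      · simp [hlen]
      · intro j hj
        by_cases hji : j < i
        · rw [List.getD, List.getElem?_append_left (by omega), ← List.getD, htraj j hji]
        · have hj : j = i := by omega
          subst hj
          rw [List.getD, List.getElem?_append_right (by omega)]
          simp [hlen, hstate]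
      · rw [hstate]
        exact (Function.iterate_succ_apply' stepB i s0).symm

-- ===== VERDICT (by name: the statement is the Claim_ definition above) =====
theorem shuffle_shifter_spec : Claim_equal_shuffle_shifter := by
  intro user_id block_number rounds _
  unfold Spec_shuffle_shifter shuffle_shifter_alt
  rw [A_eq_iterate]
  by_cases hr : rounds ≤ 0
  · simp [hr, show rounds.toNat = 0 by omega]
  · simp only [hr, if_false]
    have hsucc : rounds.toNat = (rounds - 1).toNat + 1 := by omega
    rw [hsucc, Function.iterate_succ_apply]
    by_cases h0 : (rounds - 1).toNat = 0
    · simp [h0]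
    · simp only [h0, if_false]
      rw [bLoop_eq (rounds - 1).toNat (stepB (user_id, block_number))
        ((rounds - 1).toNat - 1) 1 [stepB (user_id, block_number)]
        (stepB (stepB (user_id, block_number))) rfl (by omega) (by omega) rfl
        (by intro j hj; interval_cases j; simp)
        (by rw [Function.iterate_one])]
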